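-- pv_equiv track=rewrite | github.com/MrBrantCode/unitest_baseline | mut_generate/mist_train_taco/taco_18162/solution.py | calculate_max_jogging_days
-- ===== SOURCE A (Python) =====
-- def calculate_max_jogging_days(n, m, graph):
--     result = 0
--     visited = set([])
--
--     for source, destinations in graph.items():
--         destination_count = {}
--
--         for x in destinations:
--             if x not in visited and x in graph:
--                 for y in graph[x]:
--                     if y not in visited:
--                         try:
--                             destination_count[y] += 1
--                         except:
--                             destination_count[y] = 1
--
--         for node, count in destination_count.items():
--             if node != source:
--                 result += count * (count - 1) // 2
--
--         visited.add(source)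
--
--     return result
-- ===== SOURCE B (Python) =====
-- def calculate_max_jogging_days(n, m, graph):
--     # Counts two-hop path pairs directly: no per-endpoint counter dict and no
--     # count*(count-1)//2 formula; instead it lists every intermediate-hop endpoint
--     # occurrence and counts equal pairs by popping from the end.
--     result = 0
--     visited = set()
--     for source, destinations in graph.items():
--         occ = [y
--                for x in destinations if x not in visited and x in graph
--                for y in graph[x] if y not in visited and y != source]
--         while occ:
--             y = occ.pop()
--             result += occ.count(y)
--         visited.add(source)
--     return result
-- ===== Notes on version B (the rewrite author's own statement) =====
-- stated objective: alternative
-- what changed: B drops A's per-endpoint counter dict and the count*(count-1)//2 formula entirely: per source it flattens the valid two-hop endpoint occurrences (filtering the source out up front) into one list and counts equal pairs directly by popping from the end and counting the popped value among the remaining ones.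
import Mathlib
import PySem

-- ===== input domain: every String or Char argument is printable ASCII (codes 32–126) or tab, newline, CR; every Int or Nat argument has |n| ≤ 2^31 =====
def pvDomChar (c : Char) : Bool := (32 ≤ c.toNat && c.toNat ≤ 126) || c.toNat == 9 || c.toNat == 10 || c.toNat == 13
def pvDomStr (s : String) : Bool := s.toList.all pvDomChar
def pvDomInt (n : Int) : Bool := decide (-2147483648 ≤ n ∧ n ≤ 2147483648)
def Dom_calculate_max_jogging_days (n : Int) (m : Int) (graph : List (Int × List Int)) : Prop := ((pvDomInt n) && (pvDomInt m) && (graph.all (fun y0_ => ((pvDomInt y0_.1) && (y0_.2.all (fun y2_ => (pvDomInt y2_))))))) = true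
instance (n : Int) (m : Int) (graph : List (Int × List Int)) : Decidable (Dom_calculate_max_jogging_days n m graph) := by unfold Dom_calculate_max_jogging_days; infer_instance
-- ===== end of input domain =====

-- B replaces A's per-endpoint counter dict and the count*(count-1)//2 formula by a direct
-- count of equal pairs in the flat list of endpoint occurrences (pop-from-end and count);
-- objective: alternative decomposition, not faster. Return-value equivalence only (no argument is mutated).

-- ===== PORT A =====
-- the Python dict argument arrives as an association list; graph.items() iterates the dict
def calculate_max_jogging_days (n : Int) (m : Int) (graph : List (Int × List Int)) : Int :=
  let g : PySem.Dict Int (List Int) := PySem.Dict.ofList graph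
  (g.items.foldl
    (fun (st : Int × PySem.Set Int) (sd : Int × List Int) =>
      let dc : PySem.Dict Int Int := sd.2.foldl
        (fun dc x =>
          if !PySem.Set.contains st.2 x && PySem.Dict.contains g x then
            (PySem.Dict.getD g x []).foldl
              (fun dc y =>
                if !PySem.Set.contains st.2 y then
                  -- try: dc[y] += 1  except: dc[y] = 1
                  PySem.Dict.insert dc y (PySem.Dict.getD dc y 0 + 1)
                else dc) dc
          else dc)
        PySem.Dict.empty
      let r : Int := dc.items.foldl
        (fun r (kc : Int × Int) =>
          if kc.1 != sd.1 then r + PySem.Int.floordiv (kc.2 * (kc.2 - 1)) 2 else r) st.1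
      (r, PySem.Set.add st.2 sd.1))
    ((0 : Int), (PySem.Set.empty : PySem.Set Int))).1

-- ===== PORT B =====
-- B's while loop pops the LAST element of occ and counts it among the remaining ones;
-- ported as structural recursion over occ.reverse (list.count is order-insensitive).
def pvPairsPop : List Int → Int
  | [] => 0
  | y :: t => (t.count y : Int) + pvPairsPop t

def calculate_max_jogging_days_alt (n : Int) (m : Int) (graph : List (Int × List Int)) : Int :=
  let g : PySem.Dict Int (List Int) := PySem.Dict.ofList graph
  (g.items.foldl
    (fun (st : Int × PySem.Set Int) (sd : Int × List Int) =>
      let occ : List Int := sd.2.flatMap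
        (fun x =>
          if !PySem.Set.contains st.2 x && PySem.Dict.contains g x then
            (PySem.Dict.getD g x []).filter
              (fun y => !PySem.Set.contains st.2 y && y != sd.1)
          else [])
      (st.1 + pvPairsPop occ.reverse, PySem.Set.add st.2 sd.1))
    ((0 : Int), (PySem.Set.empty : PySem.Set Int))).1

-- ===== PRECONDITION & SPEC =====
def Spec_calculate_max_jogging_days (n : Int) (m : Int) (graph : List (Int × List Int)) (out : Int) : Prop := out = calculate_max_jogging_days_alt n m graph
instance (n : Int) (m : Int) (graph : List (Int × List Int)) (out : Int) : Decidable (Spec_calculate_max_jogging_days n m graph out) := by unfold Spec_calculate_max_jogging_days; infer_instance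

-- ===== CLAIM (what is proved, stated in full; the proofs are below) =====
def Claim_equal_calculate_max_jogging_days : Prop := ∀ (n : Int) (m : Int) (graph : List (Int × List Int)), Dom_calculate_max_jogging_days n m graph → Spec_calculate_max_jogging_days n m graph (calculate_max_jogging_days n m graph)

-- ===== LEMMAS AND PROOFS =====

-- count*(count-1)//2 on a Nat-cast count, as a Nat
theorem pvFd (c : Nat) :
    PySem.Int.floordiv ((c : Int) * ((c : Int) - 1)) 2 = ((c * (c - 1) / 2 : Nat) : Int) := by
  rw [PySem.Int.floordiv_eq_ediv_of_pos (by norm_num : (0:Int) < 2)]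
  cases c with
  | zero => simp
  | succ k =>
    have h1 : ((k + 1 : Nat) : Int) * (((k + 1 : Nat) : Int) - 1) = (((k + 1) * k : Nat) : Int) := by
      push_cast; ring
    rw [h1, show (k + 1) * (k + 1 - 1) = (k + 1) * k from by simp, Int.natCast_div]
    norm_num

-- the increment of the triangular number c*(c-1)/2
theorem pvTri (c : Nat) : (c + 1) * (c + 1 - 1) / 2 = c * (c - 1) / 2 + c := by
  cases c with
  | zero => simp
  | succ m =>
    obtain ⟨u, hu⟩ := Nat.even_mul_succ_self m
    have e2 : (m + 1) * m = u + u := by simpa [mul_comm] using hu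
    have e0 : m + 1 + 1 - 1 = m + 1 := rfl
    have e01 : m + 1 - 1 = m := rfl
    rw [e0, e01]
    have e1 : (m + 1 + 1) * (m + 1) = (m + 1) * m + 2 * (m + 1) := by ring
    rw [e1, e2]
    omega

-- a nested 'for x: if c x: for b in h x: d = f d b' loop is a fold over a flatMap
theorem pvFoldlNested {α β γ : Type} (ds : List α) (c : α → Bool) (h : α → List β)
    (f : γ → β → γ) (d0 : γ) :
    ds.foldl (fun d x => if c x then (h x).foldl f d else d) d0
      = (ds.flatMap (fun x => if c x then h x else [])).foldl f d0 := by
  induction ds generalizing d0 with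
  | nil => rfl
  | cons a t ih =>
    by_cases hc : c a = true <;>
      simp [hc, List.foldl_append, ih]

-- 'if p x then r + v x else r' accumulation is a sum
theorem pvFoldlIfAdd (l : List Int) (p : Int → Bool) (v : Int → Int) (a : Int) :
    l.foldl (fun r x => if p x then r + v x else r) a
      = a + (l.map (fun x => if p x then v x else 0)).sum := by
  induction l generalizing a with
  | nil => simp
  | cons x t ih =>
    by_cases hp : p x = true <;> simp [hp, ih, add_assoc]

-- sum over a nodup list when the summand changes at exactly one member
theorem pvSumMapExcept (L : List Int) (hnd : L.Nodup) (y : Int) (hy : y ∈ L)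
    (f g : Int → Int) (h : ∀ k ∈ L, k ≠ y → f k = g k) :
    (L.map g).sum = (L.map f).sum + (g y - f y) := by
  induction L with
  | nil => cases hy
  | cons a t ih =>
    rcases List.mem_cons.mp hy with rfl | hyt
    · have ht : ∀ k ∈ t, f k = g k := by
        intro k hk
        exact h k (List.mem_cons_of_mem _ hk) (fun hk' => (List.nodup_cons.mp hnd).1 (hk' ▸ hk))
      have : t.map g = t.map f := List.map_congr_left (fun k hk => (ht k hk).symm)
      simp [this]; ring
    · have hay : a ≠ y := fun h' => (List.nodup_cons.mp hnd).1 (h' ▸ hyt)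
      have := ih (List.nodup_cons.mp hnd).2 hyt
        (fun k hk hk' => h k (List.mem_cons_of_mem _ hk) hk')
      simp [this, h a (List.mem_cons_self) hay]; ring

-- the per-source sum A computes, as a function of the occurrence list
def pvSumF (l : List Int) (s : Int) : Int :=
  ((PySem.Set.ofList l).map
    (fun k => if k != s then (((l.count k) * ((l.count k) - 1) / 2 : Nat) : Int) else 0)).sum

theorem pvSumF_append (l : List Int) (y s : Int) :
    pvSumF (l ++ [y]) s = pvSumF l s + (if y != s then (l.count y : Int) else 0) := by
  unfold pvSumF
  rw [PySem.Set.ofList_append_singleton]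
  have hcnt : ∀ k : Int, k ≠ y → (l ++ [y]).count k = l.count k := by
    intro k hk; simp [List.count_append, Ne.symm hk]
  by_cases hm : y ∈ PySem.Set.ofList l
  · rw [PySem.Set.add_of_mem hm]
    rw [pvSumMapExcept (PySem.Set.ofList l) (PySem.Set.nodup_ofList l) y hm
      (fun k => if k != s then (((l.count k) * ((l.count k) - 1) / 2 : Nat) : Int) else 0)
      (fun k => if k != s then ((((l ++ [y]).count k) * (((l ++ [y]).count k) - 1) / 2 : Nat) : Int) else 0)
      (fun k _ hk => by simp [hcnt k hk])]
    congr 1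
    by_cases hys : y = s
    · simp [hys]
    · have hys' : (y != s) = true := by simp [hys]
      have hc : (l ++ [y]).count y = l.count y + 1 := by
        simp [List.count_append]
      simp only [hys', if_true, hc]
      rw [pvTri (l.count y)]; push_cast; ring
  · rw [PySem.Set.add_of_not_mem hm]
    have hyl : y ∉ l := fun h => hm ((PySem.Set.mem_ofList _ _).mpr h)
    have hmap : (PySem.Set.ofList l).map
        (fun k => if k != s then ((((l ++ [y]).count k) * (((l ++ [y]).count k) - 1) / 2 : Nat) : Int) else 0)
        = (PySem.Set.ofList l).map
        (fun k => if k != s then (((l.count k) * ((l.count k) - 1) / 2 : Nat) : Int) else 0) := by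
      refine List.map_congr_left (fun k hk => ?_)
      have hky : k ≠ y := fun h => hyl (h ▸ (PySem.Set.mem_ofList _ _).mp hk)
      simp [hcnt k hky]
    have hcy : (l ++ [y]).count y = 1 := by
      simp [List.count_append, List.count_eq_zero_of_not_mem hyl]
    simp only [List.map_append, List.map_cons, List.map_nil, List.sum_append, hmap, hcy]
    have h0 : l.count y = 0 := List.count_eq_zero_of_not_mem hyl
    by_cases hys : y = s <;> simp [hys, h0]

theorem pvPairsPop_append (m : List Int) (y : Int) :
    pvPairsPop ((m ++ [y]).reverse) = (m.count y : Int) + pvPairsPop m.reverse := by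
  simp [List.reverse_append, pvPairsPop, List.count_reverse]

-- core: A's per-source sum equals B's pair count over the source-filtered occurrence list
theorem pvInner (l : List Int) (s : Int) :
    pvSumF l s = pvPairsPop ((l.filter (fun y => y != s)).reverse) := by
  induction l using List.reverseRecOn with
  | nil => simp [pvSumF, pvPairsPop, PySem.Set.ofList]
  | append_singleton l y ih =>
    rw [pvSumF_append, List.filter_append]
    by_cases hys : y = s
    · simp [hys, ih]
    · have hys' : (y != s) = true := by simp [hys]
      simp only [hys', if_true, List.filter_cons, List.filter_nil]
      rw [pvPairsPop_append, ih, List.count_filter (p := fun y => y != s) (a := y) (l := l) hys']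
      ring

-- ===== VERDICT (by name: the statement is the Claim_ definition above) =====
theorem calculate_max_jogging_days_spec : Claim_equal_calculate_max_jogging_days := by
  intro n m graph _
  unfold Spec_calculate_max_jogging_days calculate_max_jogging_days calculate_max_jogging_days_alt
  dsimp only
  set g := PySem.Dict.ofList graph with hg
  congr 1
  apply PySem.List.foldl_congr_mem
  intro st sd _
  dsimp only
  congr 1
  -- A's inner dict loop is the Counter of the occurrence list
  rw [PySem.List.foldl_congr_mem sd.2 _ (fun dc x =>
        if !PySem.Set.contains st.2 x && PySem.Dict.contains g x then
          ((PySem.Dict.getD g x []).filter (fun y => !PySem.Set.contains st.2 y)).foldl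
            (fun dc y => PySem.Dict.insert dc y (PySem.Dict.getD dc y 0 + 1)) dc
        else dc) PySem.Dict.empty
      (by
        intro dc x _
        dsimp only
        by_cases hc : (!PySem.Set.contains st.2 x && PySem.Dict.contains g x) = true
        · rw [if_pos hc, if_pos hc]
          exact PySem.List.foldl_if_eq_foldl_filter
            (p := fun y => !PySem.Set.contains st.2 y)
            (f := fun dc y => PySem.Dict.insert dc y (PySem.Dict.getD dc y 0 + 1)) _ _
        · rw [if_neg hc, if_neg hc]),
     pvFoldlNested, PySem.Dict.foldl_insert_getD_add_one_eq_counter]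
  set l := sd.2.flatMap (fun x =>
    if !PySem.Set.contains st.2 x && PySem.Dict.contains g x then
      (PySem.Dict.getD g x []).filter (fun y => !PySem.Set.contains st.2 y)
    else []) with hl
  -- A's summation loop over the counter's items
  rw [PySem.Dict.items_counter, List.foldl_map]
  dsimp only
  rw [pvFoldlIfAdd (PySem.Set.ofList l) (fun k => k != sd.1) (fun k => PySem.Int.floordiv ((l.count k : Int) * ((l.count k : Int) - 1)) 2) st.1]
  have hmap : (PySem.Set.ofList l).map
      (fun x => if x != sd.1 then PySem.Int.floordiv ((l.count x : Int) * ((l.count x : Int) - 1)) 2 else 0)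
      = (PySem.Set.ofList l).map
      (fun k => if k != sd.1 then (((l.count k) * ((l.count k) - 1) / 2 : Nat) : Int) else 0) := by
    refine List.map_congr_left (fun k _ => ?_)
    by_cases h : k = sd.1
    · simp [h]
    · have hb : (k != sd.1) = true := by simp [h]
      rw [if_pos hb, if_pos hb]
      exact pvFd (l.count k)
  rw [hmap]
  -- B's occurrence list is A's, filtered of the source
  have hocc : sd.2.flatMap (fun x =>
      if !PySem.Set.contains st.2 x && PySem.Dict.contains g x then
        (PySem.Dict.getD g x []).filter (fun y => !PySem.Set.contains st.2 y && y != sd.1)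
      else []) = l.filter (fun y => y != sd.1) := by
    rw [hl, List.filter_flatMap]
    refine List.flatMap_congr (fun x _ => ?_)
    by_cases hc : (!PySem.Set.contains st.2 x && PySem.Dict.contains g x) = true
    · rw [if_pos hc, if_pos hc, List.filter_filter]
      exact List.filter_congr (fun a _ => Bool.and_comm _ _)
    · rw [if_neg hc, if_neg hc, List.filter_nil]
  rw [hocc]
  exact congrArg (st.1 + ·) (pvInner l sd.1)
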